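-- pv_equiv track=rewrite | github.com/Trummler12/Schoolsystem2 | backend/src/main/resources/scripts/topics/enrich_disciplines_csv.py | merge_attached_to
-- ===== SOURCE A (Python) =====
-- DEFAULT_REQ_TYPE = "0"
--
-- def parse_attached_to(value: str):
--     if not value:
--         return []
--     parts = [p.strip() for p in value.split(";") if p.strip()]
--     refs = []
--     for part in parts:
--         if "|" in part:
--             ref, req = part.split("|", 1)
--         else:
--             ref, req = part, DEFAULT_REQ_TYPE
--         refs.append((ref.strip(), req.strip()))
--     return refs
--
-- def format_attached_to(refs):
--     if not refs:
--         return ""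
--     parts = [f"{ref}|{req}" for ref, req in refs]
--     return ";".join(parts)
--
-- def merge_attached_to(base_value: str, extra_value: str):
--     if not extra_value:
--         return base_value
--     if extra_value.startswith("override:"):
--         merged = parse_attached_to(extra_value[len("override:") :])
--     else:
--         merged = parse_attached_to(base_value) + parse_attached_to(extra_value)
--     def req_rank(req: str):
--         try:
--             return int(req)
--         except ValueError:
--             return None
--
--     best_by_ref = {}
--     order = []
--     for ref, req in merged:
--         rank = req_rank(req)
--         if ref not in best_by_ref:
--             best_by_ref[ref] = req
--             order.append(ref)
--             continue
--         current = req_rank(best_by_ref[ref])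
--         if rank is None:
--             continue
--         if current is None or rank < current:
--             best_by_ref[ref] = req
--
--     deduped = [(ref, best_by_ref[ref]) for ref in order]
--     return format_attached_to(deduped)
-- ===== SOURCE B (Python) =====
-- DEFAULT_REQ_TYPE = "0"
--
-- def parse_attached_to(value: str):
--     if not value:
--         return []
--     parts = [p.strip() for p in value.split(";") if p.strip()]
--     refs = []
--     for part in parts:
--         if "|" in part:
--             ref, req = part.split("|", 1)
--         else:
--             ref, req = part, DEFAULT_REQ_TYPE
--         refs.append((ref.strip(), req.strip()))
--     return refs
--
-- def format_attached_to(refs):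
--     if not refs:
--         return ""
--     parts = [f"{ref}|{req}" for ref, req in refs]
--     return ";".join(parts)
--
-- def merge_attached_to(base_value: str, extra_value: str):
--     if not extra_value:
--         return base_value
--     if extra_value.startswith("override:"):
--         merged = parse_attached_to(extra_value[len("override:") :])
--     else:
--         merged = parse_attached_to(base_value) + parse_attached_to(extra_value)
--
--     groups = {}
--     for ref, req in merged:
--         groups.setdefault(ref, []).append(req)
--
--     def key(req: str):
--         try:
--             return (0, int(req))
--         except ValueError:
--             return (1, 0)
--
--     deduped = [(ref, min(reqs, key=key)) for ref, reqs in groups.items()]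
--     return format_attached_to(deduped)
-- ===== Notes on version B (the rewrite author's own statement) =====
-- stated objective: alternative
-- what changed: Instead of A's single pass that keeps a best-req-so-far dict with an in-place rank-comparison update rule, B groups all reqs per ref into an insertion-ordered dict of lists and then picks each ref's req as a stable min under the key (is-int?, int value), relying on min's first-wins tie behaviour.
import Mathlib
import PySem

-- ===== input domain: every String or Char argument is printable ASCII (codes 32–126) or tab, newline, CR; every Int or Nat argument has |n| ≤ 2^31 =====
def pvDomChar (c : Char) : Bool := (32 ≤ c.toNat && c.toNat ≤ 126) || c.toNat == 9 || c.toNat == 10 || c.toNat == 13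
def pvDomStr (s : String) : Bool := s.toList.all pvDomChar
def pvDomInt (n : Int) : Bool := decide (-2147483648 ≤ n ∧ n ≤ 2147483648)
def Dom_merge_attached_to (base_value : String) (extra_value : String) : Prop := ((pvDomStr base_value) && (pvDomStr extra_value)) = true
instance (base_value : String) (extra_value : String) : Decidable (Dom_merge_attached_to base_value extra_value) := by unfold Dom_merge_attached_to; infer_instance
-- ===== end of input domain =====

-- B replaces A's running best-rank dictionary-update loop by grouping all reqs per ref
-- (dict of lists in first-seen order) and taking a stable min with an (is-int, value) key:
-- alternative decomposition, same cost.

-- ===== PORT A =====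
-- shared helpers (identical in Source A and Source B): parse_attached_to / format_attached_to
def parseAttachedTo (value : String) : List (String × String) :=
  if value == "" then []
  else
    let parts := (((PySem.Str.split? value ";").getD []).map PySem.Str.strip).filter (fun p => p ≠ "")
    parts.map (fun part =>
      if PySem.Str.isIn "|" part then
        match (PySem.Str.splitMax? part "|" 1).getD [] with
        | r :: q :: _ => (PySem.Str.strip r, PySem.Str.strip q)
        | _ => ("", "")   -- unreachable: split(sep, 1) with sep present yields two pieces
      else (PySem.Str.strip part, "0"))

def formatAttachedTo (refs : List (String × String)) : String :=
  if refs = [] then ""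
  else PySem.Str.join ";" (refs.map (fun p => PySem.Str.join "" [p.1, "|", p.2]))

-- the body of A's `for ref, req in merged` loop (state = (best_by_ref, order))
def mergeStepA (st : PySem.Dict String String × List String) (p : String × String) :
    PySem.Dict String String × List String :=
  let rank := PySem.Int.ofStr? p.2
  if st.1.contains p.1 = false then (st.1.insert p.1 p.2, st.2 ++ [p.1])
  else
    let current := PySem.Int.ofStr? (st.1.getD p.1 "")
    match rank with
    | none => st
    | some r =>
      match current with
      | none => (st.1.insert p.1 p.2, st.2)
      | some c => if r < c then (st.1.insert p.1 p.2, st.2) else st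

def merge_attached_to (base_value : String) (extra_value : String) : String :=
  if extra_value == "" then base_value
  else
    let merged :=
      if PySem.Str.startswith extra_value "override:" then
        parseAttachedTo (PySem.Str.slice extra_value (some 9) none)
      else
        parseAttachedTo base_value ++ parseAttachedTo extra_value
    let res := merged.foldl mergeStepA ((PySem.Dict.empty : PySem.Dict String String), ([] : List String))
    formatAttachedTo (res.2.map (fun ref => (ref, res.1.getD ref "")))

-- ===== PORT B =====
def merge_attached_to_alt (base_value : String) (extra_value : String) : String :=
  if extra_value == "" then base_value
  else
    let merged :=
      if PySem.Str.startswith extra_value "override:" then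
        parseAttachedTo (PySem.Str.slice extra_value (some 9) none)
      else
        parseAttachedTo base_value ++ parseAttachedTo extra_value
    let groups := merged.foldl (fun d p => d.modify p.1 [] (fun x => x ++ [p.2]))
      (PySem.Dict.empty : PySem.Dict String (List String))
    let deduped := groups.items.map (fun g =>
      (g.1, (PySem.List.min2? g.2
               (fun q => if (PySem.Int.ofStr? q).isSome then (0 : Int) else 1)
               (fun q => (PySem.Int.ofStr? q).getD 0)).getD ""))
      -- .getD "" is unreachable: every group is nonempty, so min2? is some (Python's min never sees [])
    formatAttachedTo deduped

-- ===== PRECONDITION & SPEC =====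
def Spec_merge_attached_to (base_value : String) (extra_value : String) (out : String) : Prop := out = merge_attached_to_alt base_value extra_value
instance (base_value : String) (extra_value : String) (out : String) : Decidable (Spec_merge_attached_to base_value extra_value out) := by unfold Spec_merge_attached_to; infer_instance

-- ===== CLAIM (what is proved, stated in full; the proofs are below) =====
def Claim_equal_merge_attached_to : Prop := ∀ (base_value : String) (extra_value : String), Dom_merge_attached_to base_value extra_value → Spec_merge_attached_to base_value extra_value (merge_attached_to base_value extra_value)

-- ===== LEMMAS AND PROOFS =====

def chooseReq (cur req : String) : String :=
  match PySem.Int.ofStr? req with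
  | none => cur
  | some r =>
    match PySem.Int.ofStr? cur with
    | none => req
    | some c => if r < c then req else cur

lemma keys_insert_eq (d : PySem.Dict String String) (k : String) (v : String) :
    (d.insert k v).keys = if d.contains k then d.keys else d.keys ++ [k] := by
  by_cases h : d.contains k
  · rw [if_pos h]
    have := PySem.Dict.items_insert_of_contains d v h
    simp only [PySem.Dict.keys, this, List.map_map]
    apply List.map_congr_left
    intro p _
    simp only [Function.comp]
    split <;> simp_all
  · rw [if_neg h]
    have h' : d.contains k = false := by simpa using h
    have := PySem.Dict.items_insert_of_not_contains d v h'
    simp [PySem.Dict.keys, this]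

lemma insert_self_of_get? (d : PySem.Dict String String) (k v : String)
    (hnd : d.keys.Nodup) (h : d.get? k = some v) : d.insert k v = d := by
  have hc : d.contains k := by rw [PySem.Dict.contains_eq_isSome_get?, h]; rfl
  apply PySem.Dict.ext
  rw [PySem.Dict.items_insert_of_contains d v hc]
  have : ∀ p ∈ d.items, (if (p.1 == k) = true then (k, v) else p) = p := by
    intro p hp
    split
    · next hbeq =>
      have hk : p.1 = k := eq_of_beq hbeq
      have := PySem.Dict.get?_of_mem_items d (show (p.1, p.2) ∈ d.items by simpa using hp) hnd
      rw [hk, h] at this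
      cases this
      simp [hk.symm]
    · rfl
  rw [List.map_congr_left this]
  simp

lemma stepA_of_get?_none (best : PySem.Dict String String) (order : List String)
    (p : String × String) (h : best.get? p.1 = none) :
    mergeStepA (best, order) p = (best.insert p.1 p.2, order ++ [p.1]) := by
  have hc : best.contains p.1 = false := by
    rw [PySem.Dict.contains_eq_isSome_get?, h]; rfl
  simp [mergeStepA, hc]

lemma stepA_of_get?_some (best : PySem.Dict String String) (order : List String)
    (p : String × String) (cur : String) (hnd : best.keys.Nodup)
    (h : best.get? p.1 = some cur) :
    mergeStepA (best, order) p = (best.insert p.1 (chooseReq cur p.2), order) := by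
  have hc : best.contains p.1 = true := by
    rw [PySem.Dict.contains_eq_isSome_get?, h]; rfl
  have hgd : best.getD p.1 "" = cur := by simp [PySem.Dict.getD, h]
  simp only [mergeStepA, hc, Bool.true_eq_false, if_false, hgd, chooseReq]
  cases hq : PySem.Int.ofStr? p.2 with
  | none => simp [insert_self_of_get? best p.1 cur hnd h]
  | some r =>
    cases hcu : PySem.Int.ofStr? cur with
    | none => rfl
    | some c =>
      by_cases hlt : r < c
      · simp [hlt]
      · simp [hlt, insert_self_of_get? best p.1 cur hnd h]

def pickO (o : Option String) (reqs : List String) : Option String :=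
  match o, reqs with
  | some cur, reqs => some (reqs.foldl chooseReq cur)
  | none, [] => none
  | none, q :: qs => some (qs.foldl chooseReq q)

def reqsOf (l : List (String × String)) (ref : String) : List String :=
  (l.filter (fun p => p.1 == ref)).map (fun x => x.2)

lemma foldA_char (l : List (String × String)) (best : PySem.Dict String String) (order : List String)
    (hk : best.keys = order) (hnd : best.keys.Nodup) :
    (l.foldl mergeStepA (best, order)).2 = PySem.Set.update order (l.map (fun p => p.1)) ∧
    (l.foldl mergeStepA (best, order)).1.keys = PySem.Set.update order (l.map (fun p => p.1)) ∧
    ∀ ref : String, (l.foldl mergeStepA (best, order)).1.get? ref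
      = pickO (best.get? ref) (reqsOf l ref) := by
  induction l generalizing best order with
  | nil =>
    refine ⟨rfl, by simpa [PySem.Set.update] using hk, ?_⟩
    intro ref
    cases h : best.get? ref <;> simp [pickO, reqsOf, h]
  | cons p l ih =>
    simp only [List.foldl_cons, List.map_cons]
    cases hg : best.get? p.1 with
    | none =>
      have hc : best.contains p.1 = false := by
        rw [PySem.Dict.contains_eq_isSome_get?, hg]; rfl
      have hmem : p.1 ∉ order := by
        rw [← hk]; exact (PySem.Dict.get?_eq_none_iff_not_mem_keys best p.1).mp hg
      rw [stepA_of_get?_none best order p hg]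
      have hk' : (best.insert p.1 p.2).keys = order ++ [p.1] := by
        rw [keys_insert_eq, hc]; simp [hk]
      have hnd' : (best.insert p.1 p.2).keys.Nodup := by
        rw [hk']
        refine List.Nodup.append (hk ▸ hnd) (List.nodup_singleton _) ?_
        intro a ha hb
        simp only [List.mem_singleton] at hb
        exact hmem (hb ▸ ha)
      obtain ⟨h1, h2, h3⟩ := ih (best.insert p.1 p.2) (order ++ [p.1]) hk' hnd'
      have hcon : order.contains p.1 = false := by simpa using hmem
      have hadd : PySem.Set.add order p.1 = order ++ [p.1] := by
        simp [PySem.Set.add, hcon, hmem]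
      have hupd : PySem.Set.update order (p.1 :: l.map (fun p => p.1))
          = PySem.Set.update (order ++ [p.1]) (l.map (fun p => p.1)) := by
        simp [PySem.Set.update, hadd]
      refine ⟨by rw [hupd]; exact h1, by rw [hupd]; exact h2, ?_⟩
      intro ref
      rw [h3 ref]
      by_cases href : ref = p.1
      · rw [href, PySem.Dict.get?_insert_self, hg]
        have hr : reqsOf (p :: l) p.1 = p.2 :: reqsOf l p.1 := by
          simp [reqsOf, List.filter_cons]
        rw [hr]
        rfl
      · rw [PySem.Dict.get?_insert_of_ne _ _ href]
        have : reqsOf (p :: l) ref = reqsOf l ref := by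
          simp [reqsOf, List.filter_cons, Ne.symm href]
        rw [this]
    | some cur =>
      have hc : best.contains p.1 = true := by
        rw [PySem.Dict.contains_eq_isSome_get?, hg]; rfl
      have hmem : p.1 ∈ order := by
        rw [← hk]
        have := PySem.Dict.contains_eq_decide_mem_keys best p.1
        rw [hc] at this
        exact of_decide_eq_true this.symm
      rw [stepA_of_get?_some best order p cur hnd hg]
      have hk' : (best.insert p.1 (chooseReq cur p.2)).keys = order := by
        rw [keys_insert_eq, hc]; simp [hk]
      have hnd' : (best.insert p.1 (chooseReq cur p.2)).keys.Nodup := by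
        rw [hk']; exact hk ▸ hnd
      obtain ⟨h1, h2, h3⟩ := ih _ order hk' hnd'
      have hcon : order.contains p.1 = true := by simpa using hmem
      have hadd : PySem.Set.add order p.1 = order := by
        simp [PySem.Set.add, hcon, hmem]
      have hupd : PySem.Set.update order (p.1 :: l.map (fun p => p.1))
          = PySem.Set.update order (l.map (fun p => p.1)) := by
        simp [PySem.Set.update, hadd]
      refine ⟨by rw [hupd]; exact h1, by rw [hupd]; exact h2, ?_⟩
      intro ref
      rw [h3 ref]
      by_cases href : ref = p.1
      · rw [href, PySem.Dict.get?_insert_self, hg]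
        have hr : reqsOf (p :: l) p.1 = p.2 :: reqsOf l p.1 := by
          simp [reqsOf, List.filter_cons]
        rw [hr]
        simp [pickO, List.foldl_cons]
      · rw [PySem.Dict.get?_insert_of_ne _ _ href]
        have : reqsOf (p :: l) ref = reqsOf l ref := by
          simp [reqsOf, List.filter_cons, Ne.symm href]
        rw [this]

lemma choose_step (cur q : String) :
    (if (decide ((if (PySem.Int.ofStr? q).isSome then (0:Int) else 1) < (if (PySem.Int.ofStr? cur).isSome then (0:Int) else 1)) ||
        !decide ((if (PySem.Int.ofStr? cur).isSome then (0:Int) else 1) < (if (PySem.Int.ofStr? q).isSome then (0:Int) else 1)) &&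
        decide ((PySem.Int.ofStr? q).getD 0 < (PySem.Int.ofStr? cur).getD 0)) = true
     then q else cur) = chooseReq cur q := by
  unfold chooseReq
  cases hq : PySem.Int.ofStr? q <;> cases hc : PySem.Int.ofStr? cur <;> simp [hq, hc]

def m2step (acc : Option String) (x : String) : Option String :=
  match acc with
  | none => some x
  | some m =>
    if (decide ((if (PySem.Int.ofStr? x).isSome then (0:Int) else 1) < (if (PySem.Int.ofStr? m).isSome then (0:Int) else 1)) ||
        !decide ((if (PySem.Int.ofStr? m).isSome then (0:Int) else 1) < (if (PySem.Int.ofStr? x).isSome then (0:Int) else 1)) &&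
        decide ((PySem.Int.ofStr? x).getD 0 < (PySem.Int.ofStr? m).getD 0))
    then some x else some m

lemma min2_unfold (l : List String) :
    PySem.List.min2? l
      (fun s => if (PySem.Int.ofStr? s).isSome then (0 : Int) else 1)
      (fun s => (PySem.Int.ofStr? s).getD 0) = l.foldl m2step none := by
  unfold PySem.List.min2?
  congr 1
  funext acc x
  cases acc <;> rfl

lemma m2step_some (q x : String) : m2step (some q) x = some (chooseReq q x) := by
  rw [← choose_step q x]
  exact (apply_ite some _ x q).symm

lemma foldl_m2step_some (qs : List String) (q : String) :
    qs.foldl m2step (some q) = some (qs.foldl chooseReq q) := by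
  induction qs generalizing q with
  | nil => rfl
  | cons x t ih => simp only [List.foldl_cons, m2step_some]; exact ih _

lemma min2_eq_pickO (reqs : List String) :
    PySem.List.min2? reqs
      (fun s => if (PySem.Int.ofStr? s).isSome then (0 : Int) else 1)
      (fun s => (PySem.Int.ofStr? s).getD 0) = pickO none reqs := by
  cases reqs with
  | nil => rfl
  | cons q qs =>
    rw [min2_unfold, List.foldl_cons]
    exact foldl_m2step_some qs q

lemma groups_getD (mer : List (String × String)) (ref : String) :
    ((mer.foldl (fun d p => d.modify p.1 [] (fun x => x ++ [p.2]))
      (PySem.Dict.empty : PySem.Dict String (List String))).getD ref []) = reqsOf mer ref := by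
  rw [PySem.Dict.getD_foldl_modify_append]
  simp [reqsOf, PySem.Dict.getD_empty]

lemma merged_eq (mer : List (String × String)) :
    ((mer.foldl mergeStepA ((PySem.Dict.empty : PySem.Dict String String), ([] : List String))).2.map
      (fun ref => (ref, (mer.foldl mergeStepA ((PySem.Dict.empty : PySem.Dict String String), ([] : List String))).1.getD ref "")))
    =
    ((mer.foldl (fun d p => d.modify p.1 [] (fun x => x ++ [p.2]))
        (PySem.Dict.empty : PySem.Dict String (List String))).items.map (fun g =>
      (g.1, (PySem.List.min2? g.2
               (fun q => if (PySem.Int.ofStr? q).isSome then (0 : Int) else 1)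
               (fun q => (PySem.Int.ofStr? q).getD 0)).getD ""))) := by
  obtain ⟨h1, _h2, h3⟩ := foldA_char mer PySem.Dict.empty [] (by simp [PySem.Dict.keys_empty]) (by simp [PySem.Dict.keys_empty])
  set groups := mer.foldl (fun d p => d.modify p.1 [] (fun x => x ++ [p.2]))
      (PySem.Dict.empty : PySem.Dict String (List String)) with hgroups
  have hndg : groups.keys.Nodup := by
    rw [hgroups]
    exact PySem.Dict.nodup_keys_foldl_modify_key mer (fun p => p.1) [] (fun d p => fun x => x ++ [p.2]) PySem.Dict.empty (by simp [PySem.Dict.keys_empty])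
  have hkeysg : groups.keys = PySem.Set.update [] (mer.map (fun p => p.1)) := by
    rw [hgroups]
    have := PySem.Dict.keys_foldl_modify_key mer (fun p => p.1) ([] : List String) (fun d p => fun x => x ++ [p.2]) PySem.Dict.empty
    simpa [PySem.Dict.keys_empty] using this
  rw [PySem.Dict.items_eq_map_keys groups hndg [], List.map_map, h1, ← hkeysg]
  apply List.map_congr_left
  intro ref _
  simp only [Function.comp]
  have hA : (mer.foldl mergeStepA ((PySem.Dict.empty : PySem.Dict String String), ([] : List String))).1.getD ref ""
      = (pickO none (reqsOf mer ref)).getD "" := by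
    rw [PySem.Dict.getD, h3 ref, PySem.Dict.get?_empty]
  rw [hA, groups_getD mer ref, min2_eq_pickO]

-- ===== VERDICT (by name: the statement is the Claim_ definition above) =====
theorem merge_attached_to_spec : Claim_equal_merge_attached_to := by
  intro base_value extra_value _
  unfold Spec_merge_attached_to merge_attached_to merge_attached_to_alt
  by_cases h : extra_value == ""
  · simp [h]
  · simp only [h, if_false, Bool.false_eq_true]
    exact congrArg formatAttachedTo (merged_eq _)
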